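-- pv_equiv track=rewrite | github.com/RobotJustina/Juskeshino | catkin_ws/src/planning/act_pln/scripts/grammar_checker.py | get_pattern_from_string
-- ===== SOURCE A (Python) =====
-- def get_pattern_from_string(cmd, word_list, start_idx=0, end_idx=-1):
--     sp = cmd.split()
--     triples = []
--     for i in range(2, len(sp)):
--         triples.append(sp[i-2] + ' ' + sp[i-1] + ' ' + sp[i])
--     for w in word_list:
--         if w in triples:
--             return w
--
--     sp = cmd.split()
--     pairs = []
--     for i in range(1, len(sp)):
--         pairs.append(sp[i-1] + ' ' + sp[i])
--     for w in word_list: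
--         if w in pairs:
--             return w
--
--     for w in word_list:
--         if w in cmd.split():
--             return w
--
--     for w in word_list:
--         if w in cmd:
--             return w
--     return ''
-- ===== SOURCE B (Python) =====
-- def get_pattern_from_string(cmd, word_list, start_idx=0, end_idx=-1):
--     sp = cmd.split()
--     triples = [a + ' ' + b + ' ' + c for a, b, c in zip(sp, sp[1:], sp[2:])]
--     pairs = [a + ' ' + b for a, b in zip(sp, sp[1:])]
--     best_level, best_word = 5, ''
--     for w in word_list:
--         if w in triples:
--             level = 1
--         elif w in pairs:
--             level = 2
--         elif w in sp:
--             level = 3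
--         elif w in cmd:
--             level = 4
--         else:
--             level = 5
--         if level < best_level:
--             best_level, best_word = level, w
--     return best_word
-- ===== Notes on version B (the rewrite author's own statement) =====
-- stated objective: alternative
-- what changed: Replaces A's four sequential scans of word_list (triples, pairs, tokens, substring) by a single pass that assigns each word a match level 1-4 (5 = no match) and keeps the first word of minimal level; n-gram lists are built by zipping shifted copies instead of index loops.
import Mathlib
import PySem

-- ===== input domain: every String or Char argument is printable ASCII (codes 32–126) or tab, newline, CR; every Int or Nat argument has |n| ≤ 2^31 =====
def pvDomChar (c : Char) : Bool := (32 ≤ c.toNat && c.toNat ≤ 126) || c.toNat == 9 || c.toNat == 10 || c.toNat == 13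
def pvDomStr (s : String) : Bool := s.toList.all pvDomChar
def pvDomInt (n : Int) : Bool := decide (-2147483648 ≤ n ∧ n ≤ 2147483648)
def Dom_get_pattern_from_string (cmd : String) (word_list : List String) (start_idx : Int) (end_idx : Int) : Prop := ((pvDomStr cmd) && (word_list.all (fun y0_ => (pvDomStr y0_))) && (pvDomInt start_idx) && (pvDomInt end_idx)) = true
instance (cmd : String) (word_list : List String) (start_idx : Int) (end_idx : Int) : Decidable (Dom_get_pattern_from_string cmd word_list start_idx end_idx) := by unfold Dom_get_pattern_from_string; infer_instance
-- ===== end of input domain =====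

-- B replaces A's four sequential scans of word_list by a single pass that assigns each
-- word a match level (1 triple, 2 pair, 3 token, 4 substring, 5 none) and keeps the
-- first word of minimal level; an alternative decomposition of the same cost.


-- ===== PORT A =====
def get_pattern_from_string (cmd : String) (word_list : List String) (start_idx : Int) (end_idx : Int) : String :=
  let sp := PySem.Str.split₀ cmd
  let triples := (PySem.List.pyRange 2 (sp.length : Int)).foldl
    (fun acc i => acc ++ [PySem.List.pyGetD sp (i - 2) "" ++ " " ++ PySem.List.pyGetD sp (i - 1) "" ++ " " ++ PySem.List.pyGetD sp i ""]) []
  match word_list.find? (fun w => triples.contains w) with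
  | some w => w
  | none =>
    let sp2 := PySem.Str.split₀ cmd
    let pairs := (PySem.List.pyRange 1 (sp2.length : Int)).foldl
      (fun acc i => acc ++ [PySem.List.pyGetD sp2 (i - 1) "" ++ " " ++ PySem.List.pyGetD sp2 i ""]) []
    match word_list.find? (fun w => pairs.contains w) with
    | some w => w
    | none =>
      match word_list.find? (fun w => (PySem.Str.split₀ cmd).contains w) with
      | some w => w
      | none =>
        match word_list.find? (fun w => PySem.Str.isIn w cmd) with
        | some w => w
        | none => ""

-- ===== PORT B =====
def get_pattern_from_string_alt (cmd : String) (word_list : List String) (start_idx : Int) (end_idx : Int) : String :=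
  let sp := PySem.Str.split₀ cmd
  let triples := ((sp.zip (PySem.List.slice sp (some 1) none)).zip (PySem.List.slice sp (some 2) none)).map
    (fun p => p.1.1 ++ " " ++ p.1.2 ++ " " ++ p.2)
  let pairs := (sp.zip (PySem.List.slice sp (some 1) none)).map (fun p => p.1 ++ " " ++ p.2)
  let best := word_list.foldl
    (fun (b : Int × String) w =>
      let level : Int :=
        if triples.contains w then 1
        else if pairs.contains w then 2
        else if sp.contains w then 3
        else if PySem.Str.isIn w cmd then 4
        else 5
      if level < b.1 then (level, w) else b)
    ((5 : Int), "")
  best.2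

-- ===== PRECONDITION & SPEC =====
def Spec_get_pattern_from_string (cmd : String) (word_list : List String) (start_idx : Int) (end_idx : Int) (out : String) : Prop := out = get_pattern_from_string_alt cmd word_list start_idx end_idx
instance (cmd : String) (word_list : List String) (start_idx : Int) (end_idx : Int) (out : String) : Decidable (Spec_get_pattern_from_string cmd word_list start_idx end_idx out) := by unfold Spec_get_pattern_from_string; infer_instance

-- ===== CLAIM (what is proved, stated in full; the proofs are below) =====
def Claim_equal_get_pattern_from_string : Prop := ∀ (cmd : String) (word_list : List String) (start_idx : Int) (end_idx : Int), Dom_get_pattern_from_string cmd word_list start_idx end_idx → Spec_get_pattern_from_string cmd word_list start_idx end_idx (get_pattern_from_string cmd word_list start_idx end_idx)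

-- ===== LEMMAS AND PROOFS =====

-- the per-word match level B computes
def lvlOf (tri pai sp : List String) (cmd w : String) : Int :=
  if tri.contains w then 1
  else if pai.contains w then 2
  else if sp.contains w then 3
  else if PySem.Str.isIn w cmd then 4
  else 5

-- try the levels in ks in order: first word of word_list matching the first inhabited level
def tryL (L : String → Int) : List Int → List String → String → String
  | [], _, bw => bw
  | k :: ks, wl, bw =>
    match wl.find? (fun w => L w == k) with
    | some w => w
    | none => tryL L ks wl bw

theorem find?_ext {α : Type} (l : List α) (p q : α → Bool) (h : ∀ x ∈ l, p x = q x) :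
    l.find? p = l.find? q := by
  induction l with
  | nil => rfl
  | cons x xs ih =>
    simp only [List.find?_cons, h x (List.mem_cons_self)]
    cases q x <;> simp [ih fun y hy => h y (List.mem_cons_of_mem _ hy)]

theorem tryL_nil (L : String → Int) (ks : List Int) (bw : String) :
    tryL L ks [] bw = bw := by
  induction ks with
  | nil => rfl
  | cons k ks ih => simp [tryL, ih]

theorem tryL_append (L : String → Int) (ks ks' : List Int) (wl : List String) (bw : String) :
    tryL L (ks ++ ks') wl bw = tryL L ks wl (tryL L ks' wl bw) := by
  induction ks with
  | nil => rfl
  | cons k ks ih =>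
    simp only [List.cons_append, tryL]
    cases wl.find? (fun w => L w == k) <;> simp [ih]

theorem tryL_cons_of_ne (L : String → Int) (ks : List Int) (w : String) (wl : List String)
    (bw : String) (h : ∀ k ∈ ks, L w ≠ k) :
    tryL L ks (w :: wl) bw = tryL L ks wl bw := by
  induction ks with
  | nil => rfl
  | cons k ks ih =>
    have hw : (L w == k) = false := by
      simpa using h k (List.mem_cons_self)
    simp only [tryL, List.find?_cons, hw]
    cases wl.find? (fun x => L x == k) <;>
      simp [ih fun k' hk' => h k' (List.mem_cons_of_mem _ hk')]

theorem foldl_best_eq_tryL (L : String → Int) (hL : ∀ w, 1 ≤ L w) :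
    ∀ (wl : List String) (bl : Int) (bw : String), bl ≤ 5 →
      (wl.foldl (fun b w => if L w < b.1 then (L w, w) else b) (bl, bw)).2
        = tryL L (PySem.List.pyRange 1 bl) wl bw := by
  intro wl
  induction wl with
  | nil => intro bl bw _; exact (tryL_nil L _ bw).symm
  | cons w rest ih =>
    intro bl bw hbl
    simp only [List.foldl_cons]
    by_cases h : L w < bl
    · rw [if_pos h, ih (L w) w (le_trans (le_of_lt h) hbl)]
      rw [PySem.List.pyRange_one_append 1 (L w) bl (hL w) (le_of_lt h), tryL_append,
        PySem.List.pyRange_one_cons h]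
      have hfind : (w :: rest).find? (fun x => L x == L w) = some w := by
        simp
      have hinner : tryL L (L w :: PySem.List.pyRange (L w + 1) bl) (w :: rest) bw = w := by
        simp [tryL, hfind]
      rw [hinner, tryL_cons_of_ne]
      intro k hk
      have := PySem.List.mem_pyRange_one.mp hk
      omega
    · rw [if_neg h, ih bl bw hbl, tryL_cons_of_ne]
      intro k hk
      have := PySem.List.mem_pyRange_one.mp hk
      omega

theorem triples_eq (sp : List String) :
    (PySem.List.pyRange 2 (sp.length : Int)).foldl
      (fun acc i => acc ++ [PySem.List.pyGetD sp (i - 2) "" ++ " " ++ PySem.List.pyGetD sp (i - 1) "" ++ " " ++ PySem.List.pyGetD sp i ""]) []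
    = ((sp.zip (PySem.List.slice sp (some 1) none)).zip (PySem.List.slice sp (some 2) none)).map
        (fun p => p.1.1 ++ " " ++ p.1.2 ++ " " ++ p.2) := by
  rw [PySem.List.foldl_append_singleton_eq_map, List.nil_append,
    PySem.List.slice_from_one, PySem.List.slice_from sp (by norm_num : (0:Int) ≤ 2),
    PySem.List.pyRange_one, List.map_map]
  have h2 : ((2:Int)).toNat = 2 := rfl
  rw [h2]
  apply List.ext_getElem
  · simp only [List.length_map, List.length_range, List.length_zip, List.length_tail,
      List.length_drop]
    omega
  · intro i h1 hr
    simp only [List.length_map, List.length_range] at h1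
    have hi : i + 2 < sp.length := by omega
    simp only [List.getElem_map, List.getElem_range, List.getElem_zip, List.getElem_tail,
      List.getElem_drop, Function.comp_apply]
    have e0 : (2:Int) + (i:Int) - 2 = ((i : Nat) : Int) := by omega
    have e1 : (2:Int) + (i:Int) - 1 = ((i + 1 : Nat) : Int) := by omega
    have e2 : (2:Int) + (i:Int) = ((i + 2 : Nat) : Int) := by omega
    rw [e0, e1, e2, PySem.List.pyGetD_natCast, PySem.List.pyGetD_natCast,
      PySem.List.pyGetD_natCast,
      List.getD_eq_getElem sp "" (by omega), List.getD_eq_getElem sp "" (by omega),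
      List.getD_eq_getElem sp "" (by omega)]
    simp [Nat.add_comm]

theorem pairs_eq (sp : List String) :
    (PySem.List.pyRange 1 (sp.length : Int)).foldl
      (fun acc i => acc ++ [PySem.List.pyGetD sp (i - 1) "" ++ " " ++ PySem.List.pyGetD sp i ""]) []
    = (sp.zip (PySem.List.slice sp (some 1) none)).map (fun p => p.1 ++ " " ++ p.2) := by
  rw [PySem.List.foldl_append_singleton_eq_map, List.nil_append,
    PySem.List.slice_from_one, PySem.List.pyRange_one, List.map_map]
  apply List.ext_getElem
  · simp only [List.length_map, List.length_range, List.length_zip, List.length_tail]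
    omega
  · intro i h1 hr
    simp only [List.length_map, List.length_range] at h1
    have hi : i + 1 < sp.length := by omega
    simp only [List.getElem_map, List.getElem_range, List.getElem_zip, List.getElem_tail,
      Function.comp_apply]
    have e0 : (1:Int) + (i:Int) - 1 = ((i : Nat) : Int) := by omega
    have e1 : (1:Int) + (i:Int) = ((i + 1 : Nat) : Int) := by omega
    rw [e0, e1, PySem.List.pyGetD_natCast, PySem.List.pyGetD_natCast,
      List.getD_eq_getElem sp "" (by omega), List.getD_eq_getElem sp "" (by omega)]

theorem lvl_eq_one (tri pai sp : List String) (cmd x : String) :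
    (lvlOf tri pai sp cmd x == 1) = tri.contains x := by
  unfold lvlOf
  cases hc : tri.contains x
  · rw [if_neg (by simp)]
    split_ifs <;> rfl
  · rw [if_pos rfl]
    rfl

theorem lvl_eq_two (tri pai sp : List String) (cmd x : String) (h1 : tri.contains x = false) :
    (lvlOf tri pai sp cmd x == 2) = pai.contains x := by
  unfold lvlOf
  rw [if_neg (by rw [h1]; simp)]
  cases hc : pai.contains x
  · rw [if_neg (by simp)]
    split_ifs <;> rfl
  · rw [if_pos rfl]
    rfl

theorem lvl_eq_three (tri pai sp : List String) (cmd x : String) (h1 : tri.contains x = false)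
    (h2 : pai.contains x = false) :
    (lvlOf tri pai sp cmd x == 3) = sp.contains x := by
  unfold lvlOf
  rw [if_neg (by rw [h1]; simp), if_neg (by rw [h2]; simp)]
  cases hc : sp.contains x
  · rw [if_neg (by simp)]
    split_ifs <;> rfl
  · rw [if_pos rfl]
    rfl

theorem lvl_eq_four (tri pai sp : List String) (cmd x : String) (h1 : tri.contains x = false)
    (h2 : pai.contains x = false) (h3 : sp.contains x = false) :
    (lvlOf tri pai sp cmd x == 4) = PySem.Str.isIn x cmd := by
  unfold lvlOf
  rw [if_neg (by rw [h1]; simp), if_neg (by rw [h2]; simp), if_neg (by rw [h3]; simp)]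
  cases hc : PySem.Str.isIn x cmd
  · rw [if_neg (by simp)]
    rfl
  · rw [if_pos rfl]
    rfl

theorem cascade_eq_fold (wl : List String) (tri pai sp : List String) (cmd : String) :
    (match wl.find? (fun w => tri.contains w) with
     | some w => w
     | none =>
       match wl.find? (fun w => pai.contains w) with
       | some w => w
       | none =>
         match wl.find? (fun w => sp.contains w) with
         | some w => w
         | none =>
           match wl.find? (fun w => PySem.Str.isIn w cmd) with
           | some w => w
           | none => "")
    = (wl.foldl (fun b w => if lvlOf tri pai sp cmd w < b.1 then (lvlOf tri pai sp cmd w, w) else b)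
        ((5 : Int), "")).2 := by
  rw [foldl_best_eq_tryL (lvlOf tri pai sp cmd)
    (fun w => by unfold lvlOf; split_ifs <;> norm_num) wl 5 "" (by norm_num)]
  have hr : PySem.List.pyRange 1 5 = [1, 2, 3, 4] := by decide
  rw [hr]
  simp only [tryL]
  rw [show wl.find? (fun w => lvlOf tri pai sp cmd w == 1) = wl.find? (fun w => tri.contains w) from
    find?_ext _ _ _ (fun x _ => lvl_eq_one tri pai sp cmd x)]
  cases h1 : wl.find? (fun w => tri.contains w) with
  | some w => rfl
  | none =>
    have m1 : ∀ x ∈ wl, tri.contains x = false := by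
      intro x hx
      simpa using List.find?_eq_none.mp h1 x hx
    rw [show wl.find? (fun w => lvlOf tri pai sp cmd w == 2) = wl.find? (fun w => pai.contains w) from
      find?_ext _ _ _ (fun x hx => lvl_eq_two tri pai sp cmd x (m1 x hx))]
    cases h2 : wl.find? (fun w => pai.contains w) with
    | some w => rfl
    | none =>
      have m2 : ∀ x ∈ wl, pai.contains x = false := by
        intro x hx
        simpa using List.find?_eq_none.mp h2 x hx
      rw [show wl.find? (fun w => lvlOf tri pai sp cmd w == 3) = wl.find? (fun w => sp.contains w) from
        find?_ext _ _ _ (fun x hx => lvl_eq_three tri pai sp cmd x (m1 x hx) (m2 x hx))]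
      cases h3 : wl.find? (fun w => sp.contains w) with
      | some w => rfl
      | none =>
        have m3 : ∀ x ∈ wl, sp.contains x = false := by
          intro x hx
          simpa using List.find?_eq_none.mp h3 x hx
        rw [show wl.find? (fun w => lvlOf tri pai sp cmd w == 4)
              = wl.find? (fun w => PySem.Str.isIn w cmd) from
          find?_ext _ _ _ (fun x hx => lvl_eq_four tri pai sp cmd x (m1 x hx) (m2 x hx) (m3 x hx))]

-- ===== VERDICT (by name: the statement is the Claim_ definition above) =====
theorem get_pattern_from_string_spec : Claim_equal_get_pattern_from_string := by
  intro cmd wl s e _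
  unfold Spec_get_pattern_from_string get_pattern_from_string get_pattern_from_string_alt
  simp only []
  rw [triples_eq, pairs_eq]
  exact cascade_eq_fold wl _ _ _ cmd
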